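-- pv_equiv track=rewrite | github.com/patterson-s/eliteresearchagent_v3 | services/ontology_01/review_app.py | build_hierarchical_tags
-- ===== SOURCE A (Python) =====
-- from typing import Dict, List, Optional
--
-- def build_hierarchical_tags(tag: str) -> List[str]:
--     """
--     Build the hierarchical_tags array from a canonical_tag string.
--     Supports multiple tags separated by ";".
--     "UN:Foo:Bar" -> ["UN", "UN:Foo", "UN:Foo:Bar"]
--     "UN:Foo ; ngo:research" -> ["UN", "UN:Foo", "ngo", "ngo:research"]
--     """
--     if not tag:
--         return []
--     all_htags: List[str] = []
--     for single_tag in tag.split(";"):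
--         single_tag = single_tag.strip()
--         if not single_tag:
--             continue
--         parts = single_tag.split(":")
--         all_htags.extend(
--             ":".join(parts[:i]) for i in range(1, len(parts) + 1)
--         )
--     # Deduplicate while preserving order
--     seen: set = set()
--     result: List[str] = []
--     for ht in all_htags:
--         if ht not in seen:
--             seen.add(ht)
--             result.append(ht)
--     return result
-- ===== SOURCE B (Python) =====
-- from typing import List
--
-- def build_hierarchical_tags(tag: str) -> List[str]:
--     """Single pass: prefixes grown with a running accumulator, dedup done inline."""
--     if not tag:
--         return []
--     seen: set = set()
--     result: List[str] = []
--     for single_tag in tag.split(";"):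
--         single_tag = single_tag.strip()
--         if not single_tag:
--             continue
--         parts = single_tag.split(":")
--         prefix = parts[0]
--         if prefix not in seen:
--             seen.add(prefix)
--             result.append(prefix)
--         for part in parts[1:]:
--             prefix = prefix + ":" + part
--             if prefix not in seen:
--                 seen.add(prefix)
--                 result.append(prefix)
--     return result
-- ===== Notes on version B (the rewrite author's own statement) =====
-- stated objective: simpler
-- what changed: Each tag's hierarchical prefixes are grown with a running accumulator string extended by one separator and one part per step, with deduplication done inline in the same pass, replacing A's per-prefix slice-and-rejoin comprehension followed by a separate dedup loop over the collected list.
import Mathlib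
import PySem

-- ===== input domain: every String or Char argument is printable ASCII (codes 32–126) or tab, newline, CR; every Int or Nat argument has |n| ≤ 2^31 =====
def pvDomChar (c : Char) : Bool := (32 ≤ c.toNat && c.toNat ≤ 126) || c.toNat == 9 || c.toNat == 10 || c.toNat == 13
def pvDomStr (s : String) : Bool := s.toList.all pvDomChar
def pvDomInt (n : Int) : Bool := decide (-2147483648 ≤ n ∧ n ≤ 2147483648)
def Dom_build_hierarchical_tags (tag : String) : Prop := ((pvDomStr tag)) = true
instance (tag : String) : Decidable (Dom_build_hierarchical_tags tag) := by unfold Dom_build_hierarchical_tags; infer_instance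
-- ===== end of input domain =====

-- B builds each tag's prefixes with a running accumulator and dedups inline in the same
-- pass, instead of A's slice-and-rejoin per prefix followed by a separate dedup loop
-- (objective: simpler decomposition, same observable result).

-- shared dedup step: Python's "if ht not in seen: seen.add(ht); result.append(ht)"
-- (identical statement in both Pythons)
def pvPush (st : PySem.Set String × List String) (ht : String) :
    PySem.Set String × List String :=
  if st.1.contains ht then st else (st.1.add ht, st.2 ++ [ht])

-- ===== PORT A =====
def build_hierarchical_tags (tag : String) : List String :=
  if tag = "" then []
  else
    -- all_htags: for each ";"-piece, strip, skip empty, extend with ":".join(parts[:i])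
    (((((PySem.Str.split? tag ";").getD []).foldl
        (fun acc single_tag =>
          let s := PySem.Str.strip single_tag
          if s = "" then acc
          else
            let parts := (PySem.Str.split? s ":").getD []
            acc ++ (PySem.List.pyRange 1 (PySem.List.len parts + 1)).map
                (fun i => PySem.Str.join ":" (PySem.List.slice parts none (some i))))
        [])
      -- deduplicate while preserving order
      ).foldl pvPush (PySem.Set.empty, [])).2

-- ===== PORT B =====
-- per-part step: prefix = prefix + ":" + part; push if unseen (threads (state, prefix))
def pvStep (a : (PySem.Set String × List String) × String) (part : String) :
    (PySem.Set String × List String) × String :=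
  let pre := a.2 ++ ":" ++ part
  (pvPush a.1 pre, pre)

def build_hierarchical_tags_alt (tag : String) : List String :=
  if tag = "" then []
  else
    ((((PySem.Str.split? tag ";").getD []).foldl
        (fun st single_tag =>
          let s := PySem.Str.strip single_tag
          if s = "" then st
          else
            match (PySem.Str.split? s ":").getD [] with
            | [] => st  -- unreachable: split of a nonempty string is never empty
            | p :: rest => (rest.foldl pvStep (pvPush st p, p)).1)
        (PySem.Set.empty, [])).2)

-- ===== PRECONDITION & SPEC =====
def Spec_build_hierarchical_tags (tag : String) (out : List String) : Prop := out = build_hierarchical_tags_alt tag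
instance (tag : String) (out : List String) : Decidable (Spec_build_hierarchical_tags tag out) := by unfold Spec_build_hierarchical_tags; infer_instance

-- ===== CLAIM (what is proved, stated in full; the proofs are below) =====
def Claim_equal_build_hierarchical_tags : Prop := ∀ (tag : String), Dom_build_hierarchical_tags tag → Spec_build_hierarchical_tags tag (build_hierarchical_tags tag)

-- ===== LEMMAS AND PROOFS =====

-- A's per-piece contribution to all_htags
def pvG (single : String) : List String :=
  let s := PySem.Str.strip single
  if s = "" then []
  else
    let parts := (PySem.Str.split? s ":").getD []
    (PySem.List.pyRange 1 (PySem.List.len parts + 1)).map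
      (fun i => PySem.Str.join ":" (PySem.List.slice parts none (some i)))

-- B's incremental prefix chain from a starting accumulator
def pvChain (pre : String) : List String → List String
  | [] => []
  | x :: xs => (pre ++ ":" ++ x) :: pvChain (pre ++ ":" ++ x) xs

lemma pvJoin_singleton (p : String) : PySem.Str.join ":" [p] = p := by
  simp [PySem.Str.join, PySem.Chars.join_singleton, String.ofList_toList]

lemma pvChars_join_merge (sep a b : List Char) (t : List (List Char)) :
    PySem.Chars.join sep (a :: b :: t) = PySem.Chars.join sep ((a ++ sep ++ b) :: t) := by
  cases t with
  | nil => simp [PySem.Chars.join_cons_cons, PySem.Chars.join_singleton]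
  | cons c t' => simp [PySem.Chars.join_cons_cons]

lemma pvJoin_merge (a b : String) (t : List String) :
    PySem.Str.join ":" (a :: b :: t) = PySem.Str.join ":" ((a ++ ":" ++ b) :: t) := by
  simp [PySem.Str.join, pvChars_join_merge, String.toList_append]

lemma pvRange11 : PySem.List.pyRange 1 1 = [] := by decide

lemma pvRange_map (n : Nat) :
    PySem.List.pyRange 1 ((n : Int) + 1)
      = (List.range n).map (fun k : Nat => ((k + 1 : Nat) : Int)) := by
  induction n with
  | zero => simp only [Nat.cast_zero, zero_add, List.range_zero]; exact pvRange11
  | succ m ih =>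
    rw [show ((m + 1 : Nat) : Int) + 1 = ((m : Int) + 1) + 1 by push_cast; ring]
    rw [PySem.List.pyRange_one_succ_right (by omega), ih, List.range_succ]
    simp

lemma pvTakeJoin (rest : List String) : ∀ p : String,
    (List.range (rest.length + 1)).map
        (fun k => PySem.Str.join ":" ((p :: rest).take (k + 1))) = p :: pvChain p rest := by
  induction rest with
  | nil => intro p; simp [pvJoin_singleton, pvChain]
  | cons x xs ih =>
    intro p
    simp only [List.length_cons]
    rw [List.range_succ_eq_map]
    simp only [List.map_cons, List.map_map, pvChain]
    congr 1
    · simp [pvJoin_singleton]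
    · rw [← ih (p ++ ":" ++ x)]
      refine List.map_congr_left (fun k hk => ?_)
      simp [Function.comp, List.take_succ_cons, pvJoin_merge]

lemma pvAprefix (p : String) (rest : List String) :
    (PySem.List.pyRange 1 (PySem.List.len (p :: rest) + 1)).map
        (fun i => PySem.Str.join ":" (PySem.List.slice (p :: rest) none (some i)))
      = p :: pvChain p rest := by
  rw [PySem.List.len_eq, List.length_cons, pvRange_map (rest.length + 1), List.map_map,
    ← pvTakeJoin rest p]
  refine List.map_congr_left (fun k hk => ?_)
  simp only [Function.comp_apply]
  rw [PySem.List.slice_to_natCast]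

lemma pvChain_fold (rest : List String) : ∀ (pre : String) (st : PySem.Set String × List String),
    (pvChain pre rest).foldl pvPush st = (rest.foldl pvStep (st, pre)).1 := by
  induction rest with
  | nil => intro pre st; rfl
  | cons x xs ih => intro pre st; simp only [pvChain, List.foldl_cons]; rw [ih]; rfl

-- A's loop body adds exactly pvG t to the accumulator
lemma pvGstep (acc : List String) (t : String) :
    (if PySem.Str.strip t = "" then acc
     else
       acc ++ (PySem.List.pyRange 1
            (PySem.List.len ((PySem.Str.split? (PySem.Str.strip t) ":").getD []) + 1)).map
          (fun i => PySem.Str.join ":"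
            (PySem.List.slice ((PySem.Str.split? (PySem.Str.strip t) ":").getD []) none (some i))))
      = acc ++ pvG t := by
  simp only [pvG]
  by_cases h : PySem.Str.strip t = ""
  · rw [if_pos h, if_pos h, List.append_nil]
  · rw [if_neg h, if_neg h]

lemma pvFlat (tags : List String) : ∀ acc : List String,
    tags.foldl
        (fun acc single_tag =>
          let s := PySem.Str.strip single_tag
          if s = "" then acc
          else
            let parts := (PySem.Str.split? s ":").getD []
            acc ++ (PySem.List.pyRange 1 (PySem.List.len parts + 1)).map
                (fun i => PySem.Str.join ":" (PySem.List.slice parts none (some i)))) acc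
      = acc ++ tags.flatMap pvG := by
  induction tags with
  | nil => intro acc; simp only [List.foldl_nil, List.flatMap_nil, List.append_nil]
  | cons t ts ih =>
    intro acc
    simp only [List.foldl_cons, List.flatMap_cons]
    rw [ih, pvGstep, List.append_assoc]

lemma pvInner (st : PySem.Set String × List String) (x : String) :
    List.foldl pvPush st (pvG x) =
      (if PySem.Str.strip x = "" then st
       else
         match (PySem.Str.split? (PySem.Str.strip x) ":").getD [] with
         | [] => st
         | p :: rest => (rest.foldl pvStep (pvPush st p, p)).1) := by
  simp only [pvG]
  by_cases h : PySem.Str.strip x = ""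
  · rw [if_pos h, if_pos h]; rfl
  · rw [if_neg h, if_neg h]
    cases hp : (PySem.Str.split? (PySem.Str.strip x) ":").getD [] with
    | nil =>
      have h0 : PySem.List.pyRange 1 (PySem.List.len ([] : List String) + 1) = [] := by
        rw [PySem.List.len_eq]
        simp only [List.length_nil, Nat.cast_zero, zero_add]
        exact pvRange11
      rw [h0]
      rfl
    | cons p rest =>
      rw [pvAprefix p rest, List.foldl_cons, pvChain_fold]

-- ===== VERDICT (by name: the statement is the Claim_ definition above) =====
theorem build_hierarchical_tags_spec : Claim_equal_build_hierarchical_tags := by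
  intro tag _
  unfold Spec_build_hierarchical_tags build_hierarchical_tags build_hierarchical_tags_alt
  by_cases h : tag = ""
  · rw [if_pos h, if_pos h]
  · rw [if_neg h, if_neg h, pvFlat, List.nil_append, List.foldl_flatMap]
    have hFG : (fun acc x => List.foldl pvPush acc (pvG x)) =
        (fun (st : PySem.Set String × List String) (single_tag : String) =>
          let s := PySem.Str.strip single_tag
          if s = "" then st
          else
            match (PySem.Str.split? s ":").getD [] with
            | [] => st
            | p :: rest => (rest.foldl pvStep (pvPush st p, p)).1) :=
      funext fun st => funext fun x => pvInner st x
    rw [hFG]
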